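-- pv_equiv track=rewrite | github.com/kaviyasaravanan01-png/camtocode | backend/main.py | character_level_consensus
-- ===== SOURCE A (Python) =====
-- from collections import Counter
--
-- def character_level_consensus(texts: list[str]) -> str:
--     if len(texts) == 1:
--         return texts[0]
--     lines_per_text = [t.splitlines() for t in texts]
--     max_lines = max((len(lines) for lines in lines_per_text), default=0)
--     result_lines = []
--     for line_idx in range(max_lines):
--         line_versions = [lines[line_idx] for lines in lines_per_text if line_idx < len(lines)]
--         if not line_versions:
--             continue
--         if len(set(line_versions)) == 1:
--             result_lines.append(line_versions[0])
--             continue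
--         max_chars = max(len(line) for line in line_versions)
--         consensus_line = []
--         for char_idx in range(max_chars):
--             char_votes = [lv[char_idx] for lv in line_versions if char_idx < len(lv)]
--             if not char_votes:
--                 continue
--             best_char, _ = Counter(char_votes).most_common(1)[0]
--             consensus_line.append(best_char)
--         if consensus_line:
--             result_lines.append("".join(consensus_line))
--     return "\n".join(result_lines)
-- ===== SOURCE B (Python) =====
-- from collections import Counter
--
-- def character_level_consensus(texts: list[str]) -> str:
--     if len(texts) == 1:
--         return texts[0]
--     lines_per_text = [t.splitlines() for t in texts]
--     max_lines = max((len(lines) for lines in lines_per_text), default=0)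
--     result_lines = []
--     for line_idx in range(max_lines):
--         line_versions = [lines[line_idx] for lines in lines_per_text if line_idx < len(lines)]
--         if not line_versions:
--             continue
--         first = line_versions[0]
--         if all(lv == first for lv in line_versions):
--             result_lines.append(first)
--             continue
--         # Row-major: one pass over the versions, accumulating per-position counters.
--         counters = []
--         for lv in line_versions:
--             for pos, ch in enumerate(lv):
--                 if pos == len(counters):
--                     counters.append(Counter())
--                 counters[pos][ch] += 1
--         result_lines.append("".join(c.most_common(1)[0][0] for c in counters))
--     return "\n".join(result_lines)
-- ===== Notes on version B (the rewrite author's own statement) =====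
-- stated objective: alternative
-- what changed: Replaces A's column-major vote gathering (for each character position, an inner scan over all line versions building a votes list) by a single row-major pass over the versions that accumulates a growing list of per-position Counters, read out once at the end; the per-line all-identical fast path uses an all()-against-first test instead of building a set.
import Mathlib
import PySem

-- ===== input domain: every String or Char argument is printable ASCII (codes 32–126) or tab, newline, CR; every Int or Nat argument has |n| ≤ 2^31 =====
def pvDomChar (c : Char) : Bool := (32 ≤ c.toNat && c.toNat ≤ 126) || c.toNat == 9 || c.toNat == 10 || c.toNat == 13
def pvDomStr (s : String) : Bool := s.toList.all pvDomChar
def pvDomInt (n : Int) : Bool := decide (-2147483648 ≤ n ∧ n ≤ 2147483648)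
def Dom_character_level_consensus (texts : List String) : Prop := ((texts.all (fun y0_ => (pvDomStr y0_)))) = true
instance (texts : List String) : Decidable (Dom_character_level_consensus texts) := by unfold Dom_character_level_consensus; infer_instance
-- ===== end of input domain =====

-- B replaces A's column-major vote gathering (inner scan over all versions per character
-- position) by a single row-major pass over the versions that accumulates a per-position
-- list of counters (objective: alternative decomposition, same asymptotic cost).

-- ===== PORT A =====

-- Counter(votes).most_common(1)[0][0]: most_common sorts the counter's items by count,
-- descending and stable (insertion order breaks ties), and [0] takes the first; the ports
-- only apply this under a guard that makes the counter non-empty, so headD's default is dead.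
def pvMostCommon1 (d : PySem.Dict Char Int) : Char :=
  ((PySem.List.sorted d.items (fun p => p.2) true).headD (' ', 0)).1

def character_level_consensus (texts : List String) : String :=
  if texts.length = 1 then texts.headD "" else
  let lines_per_text : List (List (List Char)) :=
    texts.map (fun t => (PySem.Str.splitlines t).map String.toList)
  let max_lines : Nat := (lines_per_text.map List.length).foldl max 0
  let result_lines : List (List Char) :=
    (List.range max_lines).foldl (fun acc line_idx =>
      let line_versions : List (List Char) :=
        lines_per_text.filterMap (fun lines => lines[line_idx]?)
      if line_versions = [] then acc
      else if PySem.Set.len (PySem.Set.ofList line_versions) = 1 then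
        acc ++ [line_versions.headD []]
      else
        let max_chars : Nat := (line_versions.map List.length).foldl max 0
        let consensus_line : List Char :=
          (List.range max_chars).foldl (fun cl char_idx =>
            let char_votes : List Char := line_versions.filterMap (fun lv => lv[char_idx]?)
            if char_votes = [] then cl
            else cl ++ [pvMostCommon1 (PySem.Dict.counter char_votes)]) []
        if consensus_line = [] then acc else acc ++ [consensus_line]) []
  String.ofList (PySem.Chars.join ['\n'] result_lines)

-- ===== PORT B =====

-- B's inner loop `for pos, ch in enumerate(lv): if pos == len(counters): counters.append(Counter());
-- counters[pos][ch] += 1` walks positions 0,1,2,… of lv while indexing/extending `counters`: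
-- transcribed as the obvious structural recursion over both lists in step.
def pvFeed (cs : List (PySem.Dict Char Int)) (lv : List Char) : List (PySem.Dict Char Int) :=
  match cs, lv with
  | cs, [] => cs
  | [], ch :: t => (PySem.Dict.empty.modify ch 0 (· + 1)) :: pvFeed [] t
  | c :: cs, ch :: t => (c.modify ch 0 (· + 1)) :: pvFeed cs t

def character_level_consensus_alt (texts : List String) : String :=
  if texts.length = 1 then texts.headD "" else
  let lines_per_text : List (List (List Char)) :=
    texts.map (fun t => (PySem.Str.splitlines t).map String.toList)
  let max_lines : Nat := (lines_per_text.map List.length).foldl max 0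
  let result_lines : List (List Char) :=
    (List.range max_lines).foldl (fun acc line_idx =>
      let line_versions : List (List Char) :=
        lines_per_text.filterMap (fun lines => lines[line_idx]?)
      if line_versions = [] then acc
      else
        let first : List Char := line_versions.headD []
        if line_versions.all (fun lv => lv = first) then acc ++ [first]
        else
          let counters : List (PySem.Dict Char Int) := line_versions.foldl pvFeed []
          acc ++ [counters.map pvMostCommon1]) []
  String.ofList (PySem.Chars.join ['\n'] result_lines)

-- ===== PRECONDITION & SPEC =====
def Spec_character_level_consensus (texts : List String) (out : String) : Prop := out = character_level_consensus_alt texts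
instance (texts : List String) (out : String) : Decidable (Spec_character_level_consensus texts out) := by unfold Spec_character_level_consensus; infer_instance

-- ===== CLAIM (what is proved, stated in full; the proofs are below) =====
def Claim_equal_character_level_consensus : Prop := ∀ (texts : List String), Dom_character_level_consensus texts → Spec_character_level_consensus texts (character_level_consensus texts)


-- ===== LEMMAS AND PROOFS =====

theorem pvFeed_getElem? (lv : List Char) (cs : List (PySem.Dict Char Int)) (p : Nat) :
    (pvFeed cs lv)[p]? =
      match cs[p]?, lv[p]? with
      | some d, some ch => some (d.modify ch 0 (· + 1))
      | some d, none => some d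
      | none, some ch => some (PySem.Dict.empty.modify ch 0 (· + 1))
      | none, none => none := by
  induction lv generalizing cs p with
  | nil => cases h : cs[p]? <;> simp [pvFeed, h]
  | cons ch t ih =>
    cases cs with
    | nil =>
      cases p with
      | zero => simp [pvFeed]
      | succ q => simpa [pvFeed] using ih [] q
    | cons c cs =>
      cases p with
      | zero => simp [pvFeed]
      | succ q => simpa [pvFeed] using ih cs q

theorem pvFeed_foldl_getElem? (lvs : List (List Char)) (cs : List (PySem.Dict Char Int)) (p : Nat) :
    (lvs.foldl pvFeed cs)[p]? =
      match cs[p]? with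
      | some d => some ((lvs.filterMap (fun lv => lv[p]?)).foldl (fun d ch => d.modify ch 0 (· + 1)) d)
      | none =>
        if lvs.filterMap (fun lv => lv[p]?) = [] then none
        else some (PySem.Dict.counter (lvs.filterMap (fun lv => lv[p]?))) := by
  induction lvs generalizing cs with
  | nil => cases h : cs[p]? <;> simp [h]
  | cons lv rest ih =>
    have hstep := pvFeed_getElem? lv cs p
    rw [List.foldl_cons, ih (pvFeed cs lv)]
    cases hc : cs[p]? <;> cases hl : lv[p]? <;>
      simp only [hc, hl, hstep, List.filterMap_cons] <;>
      simp [PySem.Dict.counter_eq_foldl]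

theorem pv_lt_foldl_max (lvs : List (List Char)) (p a : Nat) :
    p < (lvs.map List.length).foldl max a ↔ p < a ∨ ∃ lv ∈ lvs, p < lv.length := by
  induction lvs generalizing a with
  | nil => simp
  | cons lv rest ih =>
    simp only [List.map_cons, List.foldl_cons, ih, List.mem_cons]
    have hm : p < max a lv.length ↔ p < a ∨ p < lv.length := by omega
    rw [hm]
    constructor
    · rintro ((h | h) | ⟨x, hx, hp⟩)
      · exact Or.inl h
      · exact Or.inr ⟨lv, Or.inl rfl, h⟩
      · exact Or.inr ⟨x, Or.inr hx, hp⟩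
    · rintro (h | ⟨x, hx | hx, hp⟩)
      · exact Or.inl (Or.inl h)
      · exact Or.inl (Or.inr (hx ▸ hp))
      · exact Or.inr ⟨x, hx, hp⟩

theorem pv_counters_eq (lvs : List (List Char)) :
    lvs.foldl pvFeed [] =
      (List.range ((lvs.map List.length).foldl max 0)).map
        (fun p => PySem.Dict.counter (lvs.filterMap (fun lv => lv[p]?))) := by
  apply List.ext_getElem?
  intro p
  have hmax := pv_lt_foldl_max lvs p 0
  have hvotes : lvs.filterMap (fun lv => lv[p]?) = [] ↔ ∀ lv ∈ lvs, lv.length ≤ p := by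
    simp [List.filterMap_eq_nil_iff]
  rw [pvFeed_foldl_getElem?]
  simp only [List.getElem?_nil]
  by_cases hp : p < (lvs.map List.length).foldl max 0
  · have hne : ¬ (lvs.filterMap (fun lv => lv[p]?) = []) := by
      rw [hvotes]
      rcases (hmax.mp hp).resolve_left (by omega) with ⟨lv, hlv, hlen⟩
      intro h
      have := h lv hlv
      omega
    rw [List.getElem?_map, List.getElem?_range hp]
    simp [hne]
  · have he : lvs.filterMap (fun lv => lv[p]?) = [] := by
      rw [hvotes]
      intro lv hlv
      by_contra hlen
      exact hp (hmax.mpr (Or.inr ⟨lv, hlv, by omega⟩))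
    rw [List.getElem?_map, List.getElem?_eq_none (by simpa using hp)]
    simp [he]

theorem pv_foldl_add_const (x : List Char) (t : List (List Char))
    (h : ∀ z ∈ t, z = x) : t.foldl PySem.Set.add [x] = [x] := by
  induction t with
  | nil => rfl
  | cons z r ih =>
    have hz := h z (by simp)
    subst hz
    rw [List.foldl_cons, PySem.Set.add_of_mem (by simp)]
    exact ih (fun w hw => h w (by simp [hw]))

theorem pv_setlen_one_iff (lv : List (List Char)) (h : lv ≠ []) :
    PySem.Set.len (PySem.Set.ofList lv) = 1 ↔ lv.all (fun x => x = lv.headD []) = true := by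
  cases lv with
  | nil => exact absurd rfl h
  | cons x t =>
    simp only [List.all_cons, List.headD_cons, List.all_eq_true, Bool.and_eq_true, decide_eq_true_eq]
    constructor
    · intro h1
      have hx : x ∈ PySem.Set.ofList (x :: t) := by
        rw [PySem.Set.mem_ofList]; simp
      obtain ⟨y, hy⟩ : ∃ y, PySem.Set.ofList (x :: t) = [y] := by
        match hs : PySem.Set.ofList (x :: t) with
        | [] => rw [hs] at hx; simp at hx
        | [y] => exact ⟨y, rfl⟩
        | y :: z :: r => rw [hs] at h1; simp [PySem.Set.len] at h1; omega
      have hyx : y = x := by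
        rw [hy] at hx; exact (by simpa using hx : x = y).symm
      refine ⟨trivial, fun z hz => ?_⟩
      have : z ∈ PySem.Set.ofList (x :: t) := by
        rw [PySem.Set.mem_ofList]; simp [hz]
      rw [hy, hyx] at this
      simpa using this
    · intro ⟨_, ht⟩
      have : PySem.Set.ofList (x :: t) = [x] := by
        rw [PySem.Set.ofList_eq_foldl, List.foldl_cons]
        have : PySem.Set.add [] x = [x] := rfl
        rw [this]
        exact pv_foldl_add_const x t ht
      simp [this, PySem.Set.len]

-- the per-line step functions of the two folds agree on every accumulator and line index
theorem pv_line_eq (lvs : List (List Char)) (acc : List (List Char)) :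
    (if lvs = [] then acc
     else if PySem.Set.len (PySem.Set.ofList lvs) = 1 then acc ++ [lvs.headD []]
     else
       let max_chars : Nat := (lvs.map List.length).foldl max 0
       let consensus_line : List Char :=
         (List.range max_chars).foldl (fun cl char_idx =>
           let char_votes : List Char := lvs.filterMap (fun lv => lv[char_idx]?)
           if char_votes = [] then cl
           else cl ++ [pvMostCommon1 (PySem.Dict.counter char_votes)]) []
       if consensus_line = [] then acc else acc ++ [consensus_line]) =
    (if lvs = [] then acc
     else
       let first : List Char := lvs.headD []
       if lvs.all (fun lv => lv = first) then acc ++ [first]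
       else acc ++ [(lvs.foldl pvFeed []).map pvMostCommon1]) := by
  by_cases hnil : lvs = []
  · simp [hnil]
  · rw [if_neg hnil, if_neg hnil]
    by_cases hall : lvs.all (fun lv => lv = lvs.headD []) = true
    · rw [if_pos ((pv_setlen_one_iff lvs hnil).mpr hall)]
      simp only [hall]
      rfl
    · rw [if_neg (fun h => hall ((pv_setlen_one_iff lvs hnil).mp h))]
      simp only [hall, Bool.false_eq_true, if_false]
      -- every position below max_chars receives at least one vote
      have hvne : ∀ p ∈ List.range ((lvs.map List.length).foldl max 0),
          lvs.filterMap (fun lv => lv[p]?) ≠ [] := by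
        intro p hp
        rw [List.mem_range] at hp
        rcases ((pv_lt_foldl_max lvs p 0).mp hp).resolve_left (by omega) with ⟨lv, hlv, hlen⟩
        intro h
        rw [List.filterMap_eq_nil_iff] at h
        have := h lv hlv
        simp at this
        omega
      -- A's guarded fold is a map over the in-range positions
      have hfold :
          (List.range ((lvs.map List.length).foldl max 0)).foldl (fun cl char_idx =>
              if lvs.filterMap (fun lv => lv[char_idx]?) = [] then cl
              else cl ++ [pvMostCommon1 (PySem.Dict.counter (lvs.filterMap (fun lv => lv[char_idx]?)))]) [] =
            (List.range ((lvs.map List.length).foldl max 0)).map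
              (fun p => pvMostCommon1 (PySem.Dict.counter (lvs.filterMap (fun lv => lv[p]?)))) := by
        have h := PySem.List.foldl_append_if
          (fun p => !decide (lvs.filterMap (fun lv => lv[p]?) = []))
          (fun p => pvMostCommon1 (PySem.Dict.counter (lvs.filterMap (fun lv => lv[p]?))))
          (List.range ((lvs.map List.length).foldl max 0)) []
        rw [List.filter_eq_self.mpr (by intro p hp; simpa using hvne p hp),
          List.nil_append] at h
        rw [← h]
        apply List.foldl_ext
        intro cl p _
        by_cases hv : lvs.filterMap (fun lv => lv[p]?) = [] <;> simp [hv]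
      -- not all versions equal forces a non-empty longest version
      have hpos : 0 < (lvs.map List.length).foldl max 0 := by
        rw [pv_lt_foldl_max]
        right
        by_contra hno
        push Not at hno
        apply hall
        rw [List.all_eq_true]
        intro z hz
        have hz0 : z = [] := by
          have := hno z hz
          simpa [List.length_eq_zero_iff] using this
        have hh : lvs.headD [] = [] := by
          cases lvs with
          | nil => rfl
          | cons x t =>
            have := hno x (by simp)
            simpa [List.length_eq_zero_iff] using this
        simp only [decide_eq_true_eq]
        rw [hz0, hh]
      simp only [hfold]
      rw [if_neg (by simp [List.range_eq_nil]; omega)]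
      rw [pv_counters_eq, List.map_map]
      rfl

-- ===== VERDICT (by name: the statement is the Claim_ definition above) =====
theorem character_level_consensus_spec : Claim_equal_character_level_consensus := by
  intro texts _
  unfold Spec_character_level_consensus character_level_consensus character_level_consensus_alt
  by_cases h1 : texts.length = 1
  · simp [h1]
  · simp only [h1, if_false]
    congr 2
    apply List.foldl_ext
    intro acc line_idx _
    exact pv_line_eq _ acc
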